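-- pv_equiv track=rewrite | github.com/yzkim9501/Baekjoon | 2630.py | checkifallsame
-- ===== SOURCE A (Python) =====
-- def checkifallsame(arr):
--     check1=True
--     check0=True
--     for i in arr:
--         for j in i:
--             if(j==1):
--                 check0=False
--             if(j==0):
--                 check1=False
--     if(check0):
--         return 'W'
--     elif (check1):
--         return 'B'
--     else:
--         return 'N'
-- ===== SOURCE B (Python) =====
-- def _classify(j):
--     if j == 1:
--         return 'B'
--     if j == 0:
--         return 'W'
--     return 'E'
--
--
-- def _merge(x, y):
--     if x == 'E':
--         return y
--     if y == 'E':
--         return x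
--     if x == y:
--         return x
--     return 'N'
--
--
-- def _judge(cells):
--     if not cells:
--         return 'E'
--     if len(cells) == 1:
--         return _classify(cells[0])
--     n = len(cells) // 2
--     return _merge(_judge(cells[:n]), _judge(cells[n:]))
--
--
-- def checkifallsame(arr):
--     cells = [j for row in arr for j in row]
--     r = _judge(cells)
--     if r == 'B':
--         return 'B'
--     if r == 'N':
--         return 'N'
--     return 'W'
-- ===== Notes on version B (the rewrite author's own statement) =====
-- stated objective: alternative
-- what changed: B classifies every cell to a local verdict (B/W/E) and reduces the flattened grid by a recursive divide-and-conquer with an associative merge (N absorbing, E neutral), instead of A's nested scan updating two boolean flags.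
import Mathlib
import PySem

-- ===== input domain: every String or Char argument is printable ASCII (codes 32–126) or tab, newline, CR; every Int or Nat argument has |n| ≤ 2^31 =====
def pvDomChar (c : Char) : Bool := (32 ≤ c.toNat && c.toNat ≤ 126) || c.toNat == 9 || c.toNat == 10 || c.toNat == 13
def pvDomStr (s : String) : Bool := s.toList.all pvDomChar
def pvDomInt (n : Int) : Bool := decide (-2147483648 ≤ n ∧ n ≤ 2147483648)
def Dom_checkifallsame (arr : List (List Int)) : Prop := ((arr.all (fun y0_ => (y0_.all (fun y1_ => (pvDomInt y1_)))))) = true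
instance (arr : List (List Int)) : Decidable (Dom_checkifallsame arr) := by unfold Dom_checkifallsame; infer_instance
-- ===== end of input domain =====

-- B replaces A's flag-updating nested scan by a divide-and-conquer monoid reduction:
-- each cell classifies to a local verdict and halves merge associatively (objective: alternative).


-- ===== PORT A =====
-- state is (check1, check0); stepA is the body of A's inner loop, branch for branch
def stepA (st : Bool × Bool) (j : Int) : Bool × Bool :=
  let st := if j == 1 then (st.1, false) else st
  let st := if j == 0 then (false, st.2) else st
  st

def checkifallsame (arr : List (List Int)) : String :=
  let st := arr.foldl (fun st i => i.foldl stepA st) (true, true)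
  if st.2 then "W" else if st.1 then "B" else "N"

-- ===== PORT B =====
def classifyB (j : Int) : String :=
  if j == 1 then "B" else if j == 0 then "W" else "E"

def mergeB (x y : String) : String :=
  if x == "E" then y
  else if y == "E" then x
  else if x == y then x
  else "N"

def judgeB (cells : List Int) : String :=
  match cells with
  | [] => "E"
  | [x] => classifyB x
  | x :: y :: rest =>
    mergeB (judgeB ((x :: y :: rest).take ((x :: y :: rest).length / 2)))
           (judgeB ((x :: y :: rest).drop ((x :: y :: rest).length / 2)))
termination_by cells.length
decreasing_by
  · simp only [List.length_take, List.length_cons]; omega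
  · simp only [List.length_drop, List.length_cons]; omega

def checkifallsame_alt (arr : List (List Int)) : String :=
  let cells := arr.flatMap (fun row => row)
  let r := judgeB cells
  if r == "B" then "B" else if r == "N" then "N" else "W"

-- ===== PRECONDITION & SPEC =====
def Spec_checkifallsame (arr : List (List Int)) (out : String) : Prop := out = checkifallsame_alt arr
instance (arr : List (List Int)) (out : String) : Decidable (Spec_checkifallsame arr out) := by unfold Spec_checkifallsame; infer_instance

-- ===== CLAIM (what is proved, stated in full; the proofs are below) =====
def Claim_equal_checkifallsame : Prop := ∀ (arr : List (List Int)), Dom_checkifallsame arr → Spec_checkifallsame arr (checkifallsame arr)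

-- ===== LEMMAS AND PROOFS =====
-- verdict encoded by (0 present, 1 present)
def codeB (z o : Bool) : String :=
  if z then (if o then "N" else "W") else (if o then "B" else "E")

theorem mergeB_code : ∀ a b c d : Bool,
    mergeB (codeB a b) (codeB c d) = codeB (a || c) (b || d) := by decide

theorem judgeB_eq (cells : List Int) :
    judgeB cells = codeB (decide ((0:Int) ∈ cells)) (decide ((1:Int) ∈ cells)) := by
  induction cells using judgeB.induct with
  | case1 => simp [judgeB, codeB]
  | case2 x =>
    rw [judgeB]
    by_cases h1 : x = 1
    · subst h1; decide
    · by_cases h0 : x = 0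
      · subst h0; decide
      · have e1 : (x == 1) = false := by simpa using h1
        have e0 : (x == 0) = false := by simpa using h0
        have m1 : decide ((1:Int) ∈ [x]) = false := by
          simp only [List.mem_singleton, decide_eq_false_iff_not]; exact fun h => h1 h.symm
        have m0 : decide ((0:Int) ∈ [x]) = false := by
          simp only [List.mem_singleton, decide_eq_false_iff_not]; exact fun h => h0 h.symm
        simp only [classifyB, codeB, e1, e0, m1, m0, Bool.false_eq_true, if_false]
  | case3 x y rest ih1 ih2 =>
    rw [judgeB, ih1, ih2, mergeB_code]
    conv_rhs => rw [← List.take_append_drop ((x :: y :: rest).length / 2) (x :: y :: rest)]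
    simp only [List.mem_append, Bool.decide_or]

theorem stepA_one (st : Bool × Bool) : stepA st 1 = (st.1, false) := by simp [stepA]
theorem stepA_zero (st : Bool × Bool) : stepA st 0 = (false, st.2) := by simp [stepA]
theorem stepA_other (st : Bool × Bool) (j : Int) (h1 : j ≠ 1) (h0 : j ≠ 0) :
    stepA st j = st := by simp [stepA, h1, h0]

theorem inner_foldl (l : List Int) (c1 c0 : Bool) :
    l.foldl stepA (c1, c0)
    = (c1 && !(decide ((0:Int) ∈ l)), c0 && !(decide ((1:Int) ∈ l))) := by
  induction l generalizing c1 c0 with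
  | nil => simp
  | cons x xs ih =>
    rw [List.foldl_cons]
    by_cases h1 : x = 1
    · subst h1; rw [stepA_one, ih]; simp
    · by_cases h0 : x = 0
      · subst h0; rw [stepA_zero, ih]; simp
      · rw [stepA_other _ _ h1 h0, ih]
        simp [eq_comm, h1, h0]

theorem outer_foldl (arr : List (List Int)) (c1 c0 : Bool) :
    arr.foldl (fun st i => i.foldl stepA st) (c1, c0)
    = (c1 && !(decide ((0:Int) ∈ arr.flatMap (fun row => row))),
       c0 && !(decide ((1:Int) ∈ arr.flatMap (fun row => row)))) := by
  induction arr generalizing c1 c0 with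
  | nil => simp
  | cons r rs ih =>
    simp only [List.foldl_cons, inner_foldl, ih, List.flatMap_cons, List.mem_append]
    by_cases h : (0:Int) ∈ r <;> by_cases h' : (1:Int) ∈ r <;> simp [h, h']

-- ===== VERDICT (by name: the statement is the Claim_ definition above) =====
theorem checkifallsame_spec : Claim_equal_checkifallsame := by
  intro arr _
  unfold Spec_checkifallsame checkifallsame checkifallsame_alt
  simp only [outer_foldl, judgeB_eq]
  cases h0 : decide ((0:Int) ∈ arr.flatMap (fun row => row)) <;>
    cases h1 : decide ((1:Int) ∈ arr.flatMap (fun row => row)) <;> simp [codeB]
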